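-- pv_equiv track=rewrite | github.com/akural19/data-privacy-security | HW 01/code.py | num_descendant_leaves
-- ===== SOURCE A (Python) =====
-- def node_index(node_name, dgh):
--     for ii in range(len(dgh)):
--         node = dgh[ii]
--         if node[0] == node_name:
--             return ii
--     raise Exception("node_index -> Node not found in dgh!")
--
-- def num_descendant_leaves(node_name, dgh):
--     num_descendant = 0
--     index = node_index(node_name, dgh)
--     node_level = dgh[index][1]
--     if index == len(dgh) - 1:
--         num_descendant = 1
--     else :
--         for ii in range(index, len(dgh) - 1):
--             if index != ii and node_level >= dgh[ii][1]:
--                 break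
--             elif dgh[ii][1] < dgh[ii+1][1]:
--                 if ii == (len(dgh) - 2):
--                     num_descendant += 1
--                 else:
--                     continue
--             else:
--                 if (ii == len(dgh) - 2) and (dgh[len(dgh) - 1][1] > node_level):
--                     num_descendant += 2
--                 else:
--                     num_descendant += 1
--     return num_descendant
-- ===== SOURCE B (Python) =====
-- def node_index(node_name, dgh):
--     for ii in range(len(dgh)):
--         node = dgh[ii]
--         if node[0] == node_name:
--             return ii
--     raise Exception("node_index -> Node not found in dgh!")
--
-- def num_descendant_leaves(node_name, dgh):
--     index = node_index(node_name, dgh)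
--     node_level = dgh[index][1]
--     # end of the subtree: first position after index whose level drops back to node_level or below
--     j = len(dgh)
--     for k in range(index + 1, len(dgh)):
--         if dgh[k][1] <= node_level:
--             j = k
--             break
--     # count the leaves inside [index, j): a position is a leaf when the next level does not increase
--     count = 0
--     for p in range(index, j):
--         if p + 1 == len(dgh) or dgh[p + 1][1] <= dgh[p][1]:
--             count += 1
--     return count
-- ===== Notes on version B (the rewrite author's own statement) =====
-- stated objective: simpler
-- what changed: Replaces A's single tangled scan with its len-2 special cases, break/continue and +=2 step by an explicit two-phase computation: first find the subtree boundary j (first later position whose level drops to node_level or below), then count leaves inside [index, j) with one uniform 'next level does not increase' test.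
import Mathlib
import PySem

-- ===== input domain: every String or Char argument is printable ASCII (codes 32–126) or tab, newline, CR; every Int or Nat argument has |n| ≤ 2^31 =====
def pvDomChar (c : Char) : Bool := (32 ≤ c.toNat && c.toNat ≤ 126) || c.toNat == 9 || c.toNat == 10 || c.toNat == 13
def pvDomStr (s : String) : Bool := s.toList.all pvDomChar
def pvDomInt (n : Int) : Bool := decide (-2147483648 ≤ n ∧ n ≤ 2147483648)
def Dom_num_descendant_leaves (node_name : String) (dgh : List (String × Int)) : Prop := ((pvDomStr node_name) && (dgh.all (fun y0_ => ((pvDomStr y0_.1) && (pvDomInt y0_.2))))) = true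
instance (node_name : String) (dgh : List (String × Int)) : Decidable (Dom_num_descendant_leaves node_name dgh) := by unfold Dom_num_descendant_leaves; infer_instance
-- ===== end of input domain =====

-- B replaces A's tangled single scan (break/continue, len-2 special cases, a '+=2' step) by an
-- explicit subtree-boundary search followed by a uniform leaf-count pass: simpler decomposition.
-- All loops carry an explicit fuel argument (always called with enough fuel) purely to make the
-- recursion structural; it never changes the computed value.

-- ===== PORT A =====
-- dgh[k][1]; every access made by either program is in range, so the default is never used
def pvLvl (dgh : List (String × Int)) (k : Nat) : Int :=
  ((PySem.List.pyGet? dgh (k : Int)).map Prod.snd).getD 0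

-- shared helper 'node_index' (both Source A and Source B use this same module-level function);
-- 'none' is Python's raised Exception (loop over, or fuel out — fuel dgh.length + 1 always suffices)
def pvNodeIndexLoop (node_name : String) (dgh : List (String × Int)) : Nat → Nat → Option Nat
  | 0, _ => none
  | fuel + 1, ii =>
    match dgh[ii]? with
    | none => none
    | some node =>
      if node.1 == node_name then some ii
      else pvNodeIndexLoop node_name dgh fuel (ii + 1)

-- A's for-loop over ii in range(index, len(dgh)-1), with its break/continue and acc updates
def pvALoop (dgh : List (String × Int)) (index : Nat) (node_level : Int) : Nat → Nat → Int → Int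
  | 0, _, acc => acc
  | fuel + 1, ii, acc =>
    if ii < dgh.length - 1 then
      if index ≠ ii ∧ node_level ≥ pvLvl dgh ii then acc  -- break
      else if pvLvl dgh ii < pvLvl dgh (ii + 1) then
        if ii + 2 = dgh.length then pvALoop dgh index node_level fuel (ii + 1) (acc + 1)
        else pvALoop dgh index node_level fuel (ii + 1) acc  -- continue
      else
        if ii + 2 = dgh.length ∧ pvLvl dgh (dgh.length - 1) > node_level then
          pvALoop dgh index node_level fuel (ii + 1) (acc + 2)
        else pvALoop dgh index node_level fuel (ii + 1) (acc + 1)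
    else acc

def num_descendant_leaves (node_name : String) (dgh : List (String × Int)) : Int :=
  match pvNodeIndexLoop node_name dgh (dgh.length + 1) 0 with
  | none => 0  -- unreachable under Pre_: Python raises here
  | some index =>
    let node_level := pvLvl dgh index
    if index = dgh.length - 1 then 1
    else pvALoop dgh index node_level dgh.length index 0

-- ===== PORT B =====
-- Source B's first loop: find the subtree end j
def pvFindJ (dgh : List (String × Int)) (node_level : Int) : Nat → Nat → Nat
  | 0, _ => dgh.length
  | fuel + 1, k =>
    if k < dgh.length then
      if pvLvl dgh k ≤ node_level then k else pvFindJ dgh node_level fuel (k + 1)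
    else dgh.length

-- Source B's second loop: count leaves for p in range(index, j)
def pvBLoop (dgh : List (String × Int)) (j : Nat) : Nat → Nat → Int → Int
  | 0, _, count => count
  | fuel + 1, p, count =>
    if p < j then
      pvBLoop dgh j fuel (p + 1)
        (if p + 1 = dgh.length ∨ pvLvl dgh (p + 1) ≤ pvLvl dgh p then count + 1 else count)
    else count

def num_descendant_leaves_alt (node_name : String) (dgh : List (String × Int)) : Int :=
  match pvNodeIndexLoop node_name dgh (dgh.length + 1) 0 with
  | none => 0  -- unreachable under Pre_: Python raises here
  | some index =>
    let node_level := pvLvl dgh index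
    let j := pvFindJ dgh node_level dgh.length (index + 1)
    pvBLoop dgh j dgh.length index 0

-- ===== PRECONDITION & SPEC =====
-- Pre_ excludes exactly the inputs where node_name does not occur in dgh, on which
-- node_index (hence both A and B) raises an Exception.
def Pre_num_descendant_leaves (node_name : String) (dgh : List (String × Int)) : Prop :=
  ∃ p ∈ dgh, p.1 = node_name
instance (node_name : String) (dgh : List (String × Int)) : Decidable (Pre_num_descendant_leaves node_name dgh) := by unfold Pre_num_descendant_leaves; infer_instance

def pvWitness_num_descendant_leaves : String × (List (String × Int)) :=
  ("A", [("A", 0), ("B", 1), ("C", 2), ("D", 1)])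

def Spec_num_descendant_leaves (node_name : String) (dgh : List (String × Int)) (out : Int) : Prop := out = num_descendant_leaves_alt node_name dgh
instance (node_name : String) (dgh : List (String × Int)) (out : Int) : Decidable (Spec_num_descendant_leaves node_name dgh out) := by unfold Spec_num_descendant_leaves; infer_instance

-- ===== CLAIM (what is proved, stated in full; the proofs are below) =====
def Claim_equal_num_descendant_leaves : Prop := ∀ (node_name : String) (dgh : List (String × Int)), Dom_num_descendant_leaves node_name dgh → Pre_num_descendant_leaves node_name dgh → Spec_num_descendant_leaves node_name dgh (num_descendant_leaves node_name dgh)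

-- ===== LEMMAS AND PROOFS =====

-- the number of leaves at positions [p, j): B's second loop without its accumulator or fuel
def pvCnt (dgh : List (String × Int)) (j p : Nat) : Int :=
  if _h : p < j then
    (if p + 1 = dgh.length ∨ pvLvl dgh (p + 1) ≤ pvLvl dgh p then 1 else 0) + pvCnt dgh j (p + 1)
  else 0
termination_by j - p

theorem pvCnt_end (dgh : List (String × Int)) (j p : Nat) (h : ¬ p < j) : pvCnt dgh j p = 0 := by
  rw [pvCnt, dif_neg h]

-- node_index returns some in-range index when the name occurs in dgh and there is enough fuel
theorem pvNodeIndexLoop_some_of (node_name : String) (dgh : List (String × Int)) :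
    ∀ (fuel ii m : Nat), ii ≤ m → m < ii + fuel → (hl : m < dgh.length) → dgh[m].1 = node_name →
      ∃ i, pvNodeIndexLoop node_name dgh fuel ii = some i := by
  intro fuel
  induction fuel with
  | zero => intro ii m h1 h2 _ _; omega
  | succ fuel IH =>
    intro ii m hm hfuel hl hname
    have hii : ii < dgh.length := by omega
    rw [pvNodeIndexLoop]
    simp only [List.getElem?_eq_getElem hii]
    by_cases hc : dgh[ii].1 == node_name
    · rw [if_pos hc]; exact ⟨ii, rfl⟩
    · rw [if_neg hc]
      rcases Nat.eq_or_lt_of_le hm with he | hlt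
      · subst he
        exact absurd (by simpa using hname) (by simpa using hc)
      · exact IH (ii + 1) m (by omega) (by omega) hl hname

theorem pvNodeIndexLoop_lt (node_name : String) (dgh : List (String × Int)) :
    ∀ (fuel ii i : Nat), pvNodeIndexLoop node_name dgh fuel ii = some i → i < dgh.length := by
  intro fuel
  induction fuel with
  | zero => intro ii i h; exact absurd h (by simp [pvNodeIndexLoop])
  | succ fuel IH =>
    intro ii i h
    rw [pvNodeIndexLoop] at h
    cases hg : dgh[ii]? with
    | none => rw [hg] at h; exact absurd h (by simp)
    | some node =>
      rw [hg] at h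
      simp only [] at h
      by_cases hc : node.1 == node_name
      · rw [if_pos hc] at h
        obtain rfl : ii = i := by simpa using h
        obtain ⟨hlt, -⟩ := List.getElem?_eq_some_iff.mp hg
        exact hlt
      · rw [if_neg hc] at h
        exact IH (ii + 1) i h

-- pvFindJ bounds and characterisation
theorem pvFindJ_ge (dgh : List (String × Int)) (L : Int) :
    ∀ (fuel k : Nat), k ≤ dgh.length → k ≤ pvFindJ dgh L fuel k := by
  intro fuel
  induction fuel with
  | zero => intro k hk; simpa [pvFindJ] using hk
  | succ fuel IH =>
    intro k hk
    rw [pvFindJ]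
    by_cases h1 : k < dgh.length
    · rw [if_pos h1]
      by_cases h2 : pvLvl dgh k ≤ L
      · rw [if_pos h2]
      · rw [if_neg h2]
        have := IH (k + 1) (by omega)
        omega
    · rw [if_neg h1]; omega

theorem pvFindJ_le (dgh : List (String × Int)) (L : Int) :
    ∀ (fuel k : Nat), pvFindJ dgh L fuel k ≤ dgh.length := by
  intro fuel
  induction fuel with
  | zero => intro k; simp [pvFindJ]
  | succ fuel IH =>
    intro k
    rw [pvFindJ]
    by_cases h1 : k < dgh.length
    · rw [if_pos h1]
      by_cases h2 : pvLvl dgh k ≤ L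
      · rw [if_pos h2]; omega
      · rw [if_neg h2]; exact IH (k + 1)
    · rw [if_neg h1]

theorem pvFindJ_hit (dgh : List (String × Int)) (L : Int) :
    ∀ (fuel k : Nat), pvFindJ dgh L fuel k < dgh.length → pvLvl dgh (pvFindJ dgh L fuel k) ≤ L := by
  intro fuel
  induction fuel with
  | zero => intro k h; rw [pvFindJ] at h ⊢; omega
  | succ fuel IH =>
    intro k h
    rw [pvFindJ] at h ⊢
    by_cases h1 : k < dgh.length
    · rw [if_pos h1] at h ⊢
      by_cases h2 : pvLvl dgh k ≤ L
      · rw [if_pos h2] at h ⊢; exact h2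
      · rw [if_neg h2] at h ⊢; exact IH (k + 1) h
    · rw [if_neg h1] at h; omega

theorem pvFindJ_miss (dgh : List (String × Int)) (L : Int) :
    ∀ (fuel k m : Nat), dgh.length ≤ k + fuel → k ≤ m → m < pvFindJ dgh L fuel k →
      L < pvLvl dgh m := by
  intro fuel
  induction fuel with
  | zero => intro k m hfuel hk hm; rw [pvFindJ] at hm; omega
  | succ fuel IH =>
    intro k m hfuel hk hm
    rw [pvFindJ] at hm
    by_cases h1 : k < dgh.length
    · rw [if_pos h1] at hm
      by_cases h2 : pvLvl dgh k ≤ L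
      · rw [if_pos h2] at hm; omega
      · rw [if_neg h2] at hm
        rcases Nat.eq_or_lt_of_le hk with he | hlt
        · subst he; omega
        · exact IH (k + 1) m (by omega) hlt hm
    · rw [if_neg h1] at hm; omega

-- pvFindJ from a start at or past the end is the end
theorem pvFindJ_past (dgh : List (String × Int)) (L : Int) :
    ∀ (fuel k : Nat), dgh.length ≤ k → pvFindJ dgh L fuel k = dgh.length := by
  intro fuel k hk
  cases fuel with
  | zero => rw [pvFindJ]
  | succ fuel => rw [pvFindJ, if_neg (by omega)]

theorem pvBLoop_eq_cnt (dgh : List (String × Int)) (j : Nat) :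
    ∀ (fuel p : Nat), j ≤ p + fuel → ∀ acc,
      pvBLoop dgh j fuel p acc = acc + pvCnt dgh j p := by
  intro fuel
  induction fuel with
  | zero =>
    intro p hfuel acc
    rw [pvBLoop, pvCnt_end dgh j p (by omega)]
    ring
  | succ fuel IH =>
    intro p hfuel acc
    rw [pvBLoop]
    by_cases h1 : p < j
    · rw [if_pos h1, IH (p + 1) (by omega)]
      conv_rhs => rw [pvCnt]
      rw [dif_pos h1]
      split <;> ring
    · rw [if_neg h1, pvCnt_end dgh j p h1]
      ring

-- A's loop returns its accumulator once past the loop range, whatever the remaining fuel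
theorem pvALoop_exit (dgh : List (String × Int)) (i : Nat) (L : Int) (fuel ii : Nat) (acc : Int)
    (h : ¬ ii < dgh.length - 1) : pvALoop dgh i L fuel ii acc = acc := by
  cases fuel with
  | zero => rw [pvALoop]
  | succ fuel => rw [pvALoop, if_neg h]

-- A's break: the first position at or below node_level ends the loop
theorem pvALoop_break (dgh : List (String × Int)) (i : Nat) (L : Int) (fuel ii : Nat) (acc : Int)
    (h : ii < dgh.length - 1) (h1 : i ≠ ii) (h2 : L ≥ pvLvl dgh ii) (hf : 0 < fuel) :
    pvALoop dgh i L fuel ii acc = acc := by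
  cases fuel with
  | zero => omega
  | succ fuel => rw [pvALoop, if_pos h, if_pos ⟨h1, h2⟩]

-- the heart of the proof: A's tangled scan computes exactly the leaf count of [p, j)
theorem pvALoop_eq_cnt (dgh : List (String × Int)) (i : Nat) (L : Int)
    (hL : L = pvLvl dgh i)
    (j : Nat) (hj : j = pvFindJ dgh L dgh.length (i + 1)) (hi : i < dgh.length) :
    ∀ (fuel p : Nat), dgh.length ≤ p + fuel → i ≤ p → p < j → p + 2 ≤ dgh.length →
      (p = i ∨ L < pvLvl dgh p) → ∀ acc,
        pvALoop dgh i L fuel p acc = acc + pvCnt dgh j p := by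
  have hjle : j ≤ dgh.length := hj ▸ pvFindJ_le dgh L dgh.length (i + 1)
  have hjge : i + 1 ≤ j := hj ▸ pvFindJ_ge dgh L dgh.length (i + 1) (by omega)
  have hhit : ∀ _h : j < dgh.length, pvLvl dgh j ≤ L := fun h => by
    rw [hj]; exact pvFindJ_hit dgh L dgh.length (i + 1) (by omega)
  have hmiss : ∀ m, i + 1 ≤ m → m < j → L < pvLvl dgh m := fun m h1 h2 => by
    exact pvFindJ_miss dgh L dgh.length (i + 1) m (by omega) h1 (by omega)
  intro fuel
  induction fuel with
  | zero => intro p hfuel hip hpj hplen hinv acc; omega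
  | succ fuel IH =>
    intro p hfuel hip hpj hplen hinv acc
    have hpge : L ≤ pvLvl dgh p := by
      rcases hinv with he | hlt
      · rw [he, hL]
      · omega
    have hploop : p < dgh.length - 1 := by omega
    rw [pvALoop, if_pos hploop]
    have hnb : ¬ (i ≠ p ∧ L ≥ pvLvl dgh p) := by
      rcases hinv with he | hlt
      · rw [he]; simp
      · rintro ⟨_, h2⟩; omega
    rw [if_neg hnb]
    by_cases hcase : pvLvl dgh p < pvLvl dgh (p + 1)
    · -- next level rises: p is not a leaf
      rw [if_pos hcase]
      have hnext : L < pvLvl dgh (p + 1) := by omega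
      have hp1j : p + 1 ≠ j ∨ j = dgh.length := by
        by_cases hjl : j < dgh.length
        · left; intro he; have := hhit hjl; rw [← he] at this; omega
        · right; omega
      have hcnt : pvCnt dgh j p = pvCnt dgh j (p + 1) := by
        rw [pvCnt, dif_pos hpj, if_neg (by omega)]
        ring
      rw [hcnt]
      by_cases hlast : p + 2 = dgh.length
      · -- the last element is the lone remaining leaf
        rw [if_pos hlast]
        have hjlen : j = dgh.length := by
          rcases hp1j with hne | he
          · omega
          · exact he
        rw [pvALoop_exit dgh i L fuel (p + 1) (acc + 1) (by omega)]
        rw [pvCnt, dif_pos (by omega), if_pos (by omega), pvCnt_end dgh j (p + 2) (by omega)]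
        ring
      · rw [if_neg hlast]
        have hp1lt : p + 1 < j := by
          rcases hp1j with hne | he <;> omega
        exact IH (p + 1) (by omega) (by omega) hp1lt (by omega) (Or.inr hnext) acc
    · -- next level does not rise: p is a leaf
      rw [if_neg hcase]
      have hleaf : pvCnt dgh j p = 1 + pvCnt dgh j (p + 1) := by
        rw [pvCnt, dif_pos hpj, if_pos (by omega)]
      by_cases hbig : p + 2 = dgh.length ∧ pvLvl dgh (dgh.length - 1) > L
      · rw [if_pos hbig]
        obtain ⟨hlast, hgt⟩ := hbig
        have hp1 : p + 1 = dgh.length - 1 := by omega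
        have hp1gt : L < pvLvl dgh (p + 1) := by rw [hp1]; exact hgt
        have hjlen : j = dgh.length := by
          by_cases hjl : j < dgh.length
          · have := hhit hjl
            have : j ≠ p + 1 := by intro he; rw [he] at this; omega
            omega
          · omega
        rw [pvALoop_exit dgh i L fuel (p + 1) (acc + 2) (by omega), hleaf]
        rw [pvCnt, dif_pos (by omega), if_pos (by omega), pvCnt_end dgh j (p + 2) (by omega)]
        ring
      · rw [if_neg hbig, hleaf]
        by_cases hp1j : p + 1 < j
        · have hlast : p + 2 ≠ dgh.length := by
            intro he
            have hjlen : j = dgh.length := by omega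
            have := hmiss (p + 1) (by omega) (by omega)
            have h2 : pvLvl dgh (dgh.length - 1) > L := by
              have he1 : dgh.length - 1 = p + 1 := by omega
              rw [he1]; omega
            exact hbig ⟨he, h2⟩
          have := IH (p + 1) (by omega) (by omega) hp1j (by omega)
            (Or.inr (hmiss (p + 1) (by omega) hp1j)) (acc + 1)
          rw [this]; ring
        · -- p + 1 = j : the loop breaks (or ends) right after counting p
          have hpj1 : p + 1 = j := by omega
          rw [pvCnt_end dgh j (p + 1) (by omega)]
          by_cases hend : p + 1 < dgh.length - 1
          · rw [pvALoop_break dgh i L fuel (p + 1) (acc + 1) hend (by omega) (by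
              have := hhit (by omega)
              rw [← hpj1] at this
              omega) (by omega)]
            ring
          · rw [pvALoop_exit dgh i L fuel (p + 1) (acc + 1) hend]
            ring

-- ===== VERDICT (by name: the statement is the Claim_ definition above) =====
theorem num_descendant_leaves_spec : Claim_equal_num_descendant_leaves := by
  intro node_name dgh _hdom hpre
  unfold Spec_num_descendant_leaves
  obtain ⟨q, hq, hname⟩ := hpre
  obtain ⟨m, hm, rfl⟩ := List.mem_iff_getElem.mp hq
  obtain ⟨i, hi⟩ := pvNodeIndexLoop_some_of node_name dgh (dgh.length + 1) 0 m
    (Nat.zero_le m) (by omega) hm hname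
  have hilen : i < dgh.length := pvNodeIndexLoop_lt node_name dgh (dgh.length + 1) 0 i hi
  simp only [num_descendant_leaves, num_descendant_leaves_alt, hi]
  by_cases hlast : i = dgh.length - 1
  · rw [if_pos hlast]
    rw [pvFindJ_past dgh (pvLvl dgh i) dgh.length (i + 1) (by omega)]
    rw [pvBLoop_eq_cnt dgh dgh.length dgh.length i (by omega)]
    rw [pvCnt, dif_pos (by omega), if_pos (by omega),
      pvCnt_end dgh dgh.length (i + 1) (by omega)]
    ring
  · rw [if_neg hlast]
    have hjge : i + 1 ≤ pvFindJ dgh (pvLvl dgh i) dgh.length (i + 1) :=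
      pvFindJ_ge dgh (pvLvl dgh i) dgh.length (i + 1) (by omega)
    rw [pvBLoop_eq_cnt dgh (pvFindJ dgh (pvLvl dgh i) dgh.length (i + 1)) dgh.length i (by
      have := pvFindJ_le dgh (pvLvl dgh i) dgh.length (i + 1)
      omega)]
    rw [pvALoop_eq_cnt dgh i (pvLvl dgh i) rfl (pvFindJ dgh (pvLvl dgh i) dgh.length (i + 1))
      rfl hilen dgh.length i (by omega) le_rfl (by omega) (by omega) (Or.inl rfl) 0]
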